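-- pv_equiv track=rewrite | github.com/daniissac/configdiff | tests/generate_report.py | extract_coverage
-- ===== SOURCE A (Python) =====
-- def extract_coverage(output: str) -> str:
--     """Extract the coverage summary block from pytest output."""
--     lines = output.splitlines()
--     cov_lines = []
--     capture = False
--     for line in lines:
--         if "Name" in line and "Stmts" in line:
--             capture = True
--         if capture:
--             cov_lines.append(line)
--             if "TOTAL" in line:
--                 break
--     return "\n".join(cov_lines) if cov_lines else "Coverage data not available."
-- ===== SOURCE B (Python) =====
-- def extract_coverage(output: str) -> str:
--     """Extract the coverage summary block from pytest output."""
--     lines = output.splitlines()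
--     start = next((i for i, line in enumerate(lines)
--                   if "Name" in line and "Stmts" in line), None)
--     if start is None:
--         return "Coverage data not available."
--     tail = lines[start:]
--     end = next((j for j, line in enumerate(tail) if "TOTAL" in line), None)
--     block = tail if end is None else tail[:end + 1]
--     return "\n".join(block)
-- ===== Notes on version B (the rewrite author's own statement) =====
-- stated objective: simpler
-- what changed: Replaces the stateful capture-flag loop (flag set on the header line, conditional append, break on TOTAL) with a stateless locate-then-slice decomposition: find the header index, slice the tail, find the first TOTAL line in the tail, and join the slice up to and including it.
import Mathlib
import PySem

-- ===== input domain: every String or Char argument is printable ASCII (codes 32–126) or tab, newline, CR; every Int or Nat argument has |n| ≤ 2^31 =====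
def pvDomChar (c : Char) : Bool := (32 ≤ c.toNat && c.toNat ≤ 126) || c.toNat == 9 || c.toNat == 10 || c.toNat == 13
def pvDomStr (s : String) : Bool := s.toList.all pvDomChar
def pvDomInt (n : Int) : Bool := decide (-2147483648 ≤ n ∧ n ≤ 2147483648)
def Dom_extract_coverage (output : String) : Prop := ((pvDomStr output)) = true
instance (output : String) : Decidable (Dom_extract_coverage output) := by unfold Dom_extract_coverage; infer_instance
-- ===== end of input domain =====

-- B replaces A's stateful capture-flag loop by a stateless locate-header / slice / locate-TOTAL / slice decomposition (objective: simpler).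

-- ===== PORT A =====
-- the for-loop of A: state = (capture, cov_lines); break on TOTAL while capturing
def pvLoopA : List String → Bool → List String → List String
  | [], _, acc => acc
  | l :: rest, capture, acc =>
    let capture' := capture || (PySem.Str.isIn "Name" l && PySem.Str.isIn "Stmts" l)
    if capture' then
      let acc' := acc ++ [l]
      if PySem.Str.isIn "TOTAL" l then acc' else pvLoopA rest capture' acc'
    else pvLoopA rest capture' acc

def extract_coverage (output : String) : String :=
  let lines := PySem.Str.splitlines output
  let cov_lines := pvLoopA lines false []
  if cov_lines.isEmpty then "Coverage data not available." else PySem.Str.join "\n" cov_lines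

-- ===== PORT B =====
-- next((i for i, line in enumerate(lines) if "Name" in line and "Stmts" in line), None)
def pvFindHeader : List String → Nat → Option Nat
  | [], _ => none
  | l :: rest, i =>
    if PySem.Str.isIn "Name" l && PySem.Str.isIn "Stmts" l then some i
    else pvFindHeader rest (i + 1)

-- next((j for j, line in enumerate(tail) if "TOTAL" in line), None)
def pvFindTotal : List String → Nat → Option Nat
  | [], _ => none
  | l :: rest, j => if PySem.Str.isIn "TOTAL" l then some j else pvFindTotal rest (j + 1)

def extract_coverage_alt (output : String) : String :=
  let lines := PySem.Str.splitlines output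
  match pvFindHeader lines 0 with
  | none => "Coverage data not available."
  | some start =>
    let tail := PySem.List.slice lines (some (start : Int)) none
    let block :=
      match pvFindTotal tail 0 with
      | none => tail
      | some e => PySem.List.slice tail none (some ((e : Int) + 1))
    PySem.Str.join "\n" block

-- ===== PRECONDITION & SPEC =====
def Spec_extract_coverage (output : String) (out : String) : Prop := out = extract_coverage_alt output
instance (output : String) (out : String) : Decidable (Spec_extract_coverage output out) := by unfold Spec_extract_coverage; infer_instance

-- ===== CLAIM (what is proved, stated in full; the proofs are below) =====
def Claim_equal_extract_coverage : Prop := ∀ (output : String), Dom_extract_coverage output → Spec_extract_coverage output (extract_coverage output)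

-- ===== LEMMAS AND PROOFS =====

-- the block from a header line: everything up to and including the first TOTAL line
def pvTakeTot : List String → List String
  | [] => []
  | l :: rest => l :: (if PySem.Str.isIn "TOTAL" l then [] else pvTakeTot rest)

theorem pvLoopA_true (lines : List String) : ∀ acc, pvLoopA lines true acc = acc ++ pvTakeTot lines := by
  induction lines with
  | nil => intro acc; simp [pvLoopA, pvTakeTot]
  | cons l rest ih =>
    intro acc
    by_cases h : PySem.Chars.isIn ['T','O','T','A','L'] l.toList = true
    · simp [pvLoopA, pvTakeTot, h]
    · simp [pvLoopA, pvTakeTot, h, ih]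

-- shift lemma for the index accumulator
theorem pvFindHeader_shift (lines : List String) (i : Nat) :
    pvFindHeader lines i = (pvFindHeader lines 0).map (· + i) := by
  induction lines generalizing i with
  | nil => simp [pvFindHeader]
  | cons l rest ih =>
    by_cases h : (PySem.Chars.isIn ['N','a','m','e'] l.toList = true ∧ PySem.Chars.isIn ['S','t','m','t','s'] l.toList = true)
    · simp [pvFindHeader, h]
    · simp only [pvFindHeader]
      rw [if_neg (by simpa using h), if_neg (by simpa using h)]
      rw [ih (i + 1), ih 1]
      cases pvFindHeader rest 0 <;> simp <;> omega

theorem pvFindTotal_shift (lines : List String) (j : Nat) :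
    pvFindTotal lines j = (pvFindTotal lines 0).map (· + j) := by
  induction lines generalizing j with
  | nil => simp [pvFindTotal]
  | cons l rest ih =>
    by_cases h : PySem.Chars.isIn ['T','O','T','A','L'] l.toList = true
    · simp [pvFindTotal, h]
    · simp only [pvFindTotal]
      rw [if_neg (by simpa using h), if_neg (by simpa using h)]
      rw [ih (j + 1), ih 1]
      cases pvFindTotal rest 0 <;> simp <;> omega

theorem pvLoopA_false (lines : List String) :
    pvLoopA lines false [] =
      match pvFindHeader lines 0 with
      | none => []
      | some s => pvTakeTot (lines.drop s) := by
  induction lines with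
  | nil => simp [pvLoopA, pvFindHeader]
  | cons l rest ih =>
    by_cases h : (PySem.Chars.isIn ['N','a','m','e'] l.toList = true ∧ PySem.Chars.isIn ['S','t','m','t','s'] l.toList = true)
    · by_cases ht : PySem.Chars.isIn ['T','O','T','A','L'] l.toList = true
      · simp [pvLoopA, pvFindHeader, pvTakeTot, h, ht]
      · simp [pvLoopA, pvFindHeader, pvTakeTot, h, ht, pvLoopA_true]
    · have h' : (PySem.Str.isIn "Name" l && PySem.Str.isIn "Stmts" l) = false := by
        simpa using h
      simp only [pvLoopA, pvFindHeader, h', Bool.false_or, if_false]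
      rw [if_neg (by simpa using h)]
      rw [ih]
      cases hf : pvFindHeader rest 0 with
      | none => simp [pvFindHeader_shift rest 1, hf]
      | some s => simp [pvFindHeader_shift rest 1, hf, List.drop_succ_cons]





-- pvTakeTot is what B's second locate-and-slice computes
theorem pvTakeTot_eq (tail : List String) :
    pvTakeTot tail =
      match pvFindTotal tail 0 with
      | none => tail
      | some e => tail.take (e + 1) := by
  induction tail with
  | nil => simp [pvTakeTot, pvFindTotal]
  | cons l rest ih =>
    by_cases h : PySem.Chars.isIn ['T','O','T','A','L'] l.toList = true
    · simp [pvTakeTot, pvFindTotal, h]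
    · simp only [pvTakeTot, pvFindTotal]
      rw [if_neg (by simpa using h), if_neg (by simpa using h)]
      rw [ih, pvFindTotal_shift rest 1]
      cases pvFindTotal rest 0 <;> simp

theorem pvTakeTot_ne_nil (t : List String) (h : t ≠ []) : pvTakeTot t ≠ [] := by
  cases t with
  | nil => exact absurd rfl h
  | cons l r => simp [pvTakeTot]

theorem pvFindHeader_lt (lines : List String) : ∀ s : Nat, pvFindHeader lines 0 = some s → s < lines.length := by
  induction lines with
  | nil => intro s h; simp [pvFindHeader] at h
  | cons l rest ih =>
    intro s h
    simp only [pvFindHeader] at h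
    cases hc : (PySem.Str.isIn "Name" l && PySem.Str.isIn "Stmts" l) with
    | true =>
      rw [if_pos (by simpa using hc)] at h
      simp at h
      simp
      omega
    | false =>
      rw [if_neg (by simpa using hc)] at h
      rw [pvFindHeader_shift rest 1] at h
      cases hr : pvFindHeader rest 0 with
      | none => rw [hr] at h; simp at h
      | some x =>
        rw [hr] at h
        have := ih x hr
        simp at h
        simp
        omega

-- ===== VERDICT (by name: the statement is the Claim_ definition above) =====
theorem extract_coverage_spec : Claim_equal_extract_coverage := by
  intro output _
  unfold Spec_extract_coverage extract_coverage extract_coverage_alt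
  simp only
  rw [pvLoopA_false]
  cases hf : pvFindHeader (PySem.Str.splitlines output) 0 with
  | none => simp
  | some s =>
    have hlt := pvFindHeader_lt (PySem.Str.splitlines output) s hf
    have hdrop : PySem.List.slice (PySem.Str.splitlines output) (some (s : Int)) none
        = (PySem.Str.splitlines output).drop s := PySem.List.slice_from_natCast ..
    have hdne : (PySem.Str.splitlines output).drop s ≠ [] := by
      simp only [ne_eq, List.drop_eq_nil_iff, not_le]
      omega
    have hne := pvTakeTot_ne_nil _ hdne
    simp only [hdrop]
    rw [if_neg (by simpa using hne)]
    rw [pvTakeTot_eq]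
    cases pvFindTotal ((PySem.Str.splitlines output).drop s) 0 with
    | none => rfl
    | some e =>
      have hsl : PySem.List.slice ((PySem.Str.splitlines output).drop s) none (some ((e : Int) + 1))
          = ((PySem.Str.splitlines output).drop s).take (e + 1) := by
        have := PySem.List.slice_to_natCast ((PySem.Str.splitlines output).drop s) (e + 1)
        push_cast at this
        exact this
      simp [hsl]
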